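-- pv_equiv track=rewrite | github.com/anans26/medchain-ai | test_suite/advanced_test_suite.py | _get_expected_diagnosis
-- ===== SOURCE A (Python) =====
-- from typing import Dict, List, Tuple, Any, Optional
--
-- def _get_expected_diagnosis(patient: Dict) -> str:
--     """Get expected diagnosis based on patient symptoms"""
--
--     # Simple mapping based on symptoms
--     symptoms = patient.get("symptoms", [])
--
--     if any(s in ["chorea", "involuntary movements", "cognitive decline"] for s in symptoms):
--         return "Huntington Disease"
--     elif any(s in ["chronic cough", "thick mucus", "recurrent lung infections"] for s in symptoms):
--         return "Cystic Fibrosis"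
--     elif any(s in ["muscle weakness", "double vision", "drooping eyelids"] for s in symptoms):
--         return "Myasthenia Gravis"
--     elif any(s in ["muscle weakness", "muscle atrophy", "fasciculations"] for s in symptoms):
--         return "Amyotrophic Lateral Sclerosis"
--     elif any(s in ["liver problems", "neurological symptoms", "tremor"] for s in symptoms):
--         return "Wilson Disease"
--     else:
--         return "Unknown"
-- ===== SOURCE B (Python) =====
-- # Inverted index: one dict from symptom -> (priority, diagnosis), one pass over
-- # the patient's symptoms keeping the minimum priority seen.  ("muscle weakness"
-- # maps to Myasthenia Gravis, the earlier of its two groups, preserving A's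
-- # branch priority; unmatched symptoms are skipped; default "Unknown".)
-- _SYMPTOM_INDEX = {
--     "chorea": (0, "Huntington Disease"),
--     "involuntary movements": (0, "Huntington Disease"),
--     "cognitive decline": (0, "Huntington Disease"),
--     "chronic cough": (1, "Cystic Fibrosis"),
--     "thick mucus": (1, "Cystic Fibrosis"),
--     "recurrent lung infections": (1, "Cystic Fibrosis"),
--     "muscle weakness": (2, "Myasthenia Gravis"),
--     "double vision": (2, "Myasthenia Gravis"),
--     "drooping eyelids": (2, "Myasthenia Gravis"),
--     "muscle atrophy": (3, "Amyotrophic Lateral Sclerosis"),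
--     "fasciculations": (3, "Amyotrophic Lateral Sclerosis"),
--     "liver problems": (4, "Wilson Disease"),
--     "neurological symptoms": (4, "Wilson Disease"),
--     "tremor": (4, "Wilson Disease"),
-- }
--
-- def _get_expected_diagnosis(patient):
--     best_rank, best_dx = 5, "Unknown"
--     for s in patient.get("symptoms", []):
--         hit = _SYMPTOM_INDEX.get(s)
--         if hit is not None and hit[0] < best_rank:
--             best_rank, best_dx = hit
--     return best_dx
-- ===== Notes on version B (the rewrite author's own statement) =====
-- stated objective: alternative
-- what changed: Replaces the five ordered group scans of the if/elif chain by an inverted symptom->(priority,diagnosis) dictionary and a single pass over the patient's symptoms computing the minimum priority hit.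
import Mathlib
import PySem

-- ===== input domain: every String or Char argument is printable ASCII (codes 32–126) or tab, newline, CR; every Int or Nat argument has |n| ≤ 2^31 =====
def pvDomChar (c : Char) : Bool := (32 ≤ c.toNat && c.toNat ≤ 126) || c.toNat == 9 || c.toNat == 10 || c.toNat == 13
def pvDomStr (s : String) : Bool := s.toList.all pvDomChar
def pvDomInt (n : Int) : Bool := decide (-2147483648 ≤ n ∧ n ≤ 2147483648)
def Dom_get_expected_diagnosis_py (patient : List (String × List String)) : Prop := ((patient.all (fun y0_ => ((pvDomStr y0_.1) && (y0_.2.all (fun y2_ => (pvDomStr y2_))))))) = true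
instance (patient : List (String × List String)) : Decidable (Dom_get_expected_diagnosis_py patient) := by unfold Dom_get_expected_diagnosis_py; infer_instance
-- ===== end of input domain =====

-- B replaces A's five ordered group scans by an inverted symptom→(priority,diagnosis)
-- dictionary and a single pass computing the minimum priority hit (objective: alternative).

-- ===== PORT A =====
def get_expected_diagnosis_py (patient : List (String × List String)) : String :=
  let symptoms := (PySem.Dict.mk patient).getD "symptoms" []
  if symptoms.any (fun s => (["chorea", "involuntary movements", "cognitive decline"] : List String).contains s) then
    "Huntington Disease"
  else if symptoms.any (fun s => (["chronic cough", "thick mucus", "recurrent lung infections"] : List String).contains s) then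
    "Cystic Fibrosis"
  else if symptoms.any (fun s => (["muscle weakness", "double vision", "drooping eyelids"] : List String).contains s) then
    "Myasthenia Gravis"
  else if symptoms.any (fun s => (["muscle weakness", "muscle atrophy", "fasciculations"] : List String).contains s) then
    "Amyotrophic Lateral Sclerosis"
  else if symptoms.any (fun s => (["liver problems", "neurological symptoms", "tremor"] : List String).contains s) then
    "Wilson Disease"
  else
    "Unknown"

-- ===== PORT B =====
-- the module-level inverted index _SYMPTOM_INDEX (a dict literal, written out)
def pvSymptomIndex : PySem.Dict String (Int × String) := PySem.Dict.mk
  [ ("chorea", (0, "Huntington Disease")),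
    ("involuntary movements", (0, "Huntington Disease")),
    ("cognitive decline", (0, "Huntington Disease")),
    ("chronic cough", (1, "Cystic Fibrosis")),
    ("thick mucus", (1, "Cystic Fibrosis")),
    ("recurrent lung infections", (1, "Cystic Fibrosis")),
    ("muscle weakness", (2, "Myasthenia Gravis")),
    ("double vision", (2, "Myasthenia Gravis")),
    ("drooping eyelids", (2, "Myasthenia Gravis")),
    ("muscle atrophy", (3, "Amyotrophic Lateral Sclerosis")),
    ("fasciculations", (3, "Amyotrophic Lateral Sclerosis")),
    ("liver problems", (4, "Wilson Disease")),
    ("neurological symptoms", (4, "Wilson Disease")),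
    ("tremor", (4, "Wilson Disease")) ]

-- the for-loop: running (best_rank, best_dx), updated when a dict hit beats it
def pvBestLoop : List String → Int × String → Int × String
  | [], acc => acc
  | s :: rest, (bi, bd) =>
      match pvSymptomIndex.get? s with
      | some hit => if hit.1 < bi then pvBestLoop rest hit else pvBestLoop rest (bi, bd)
      | none => pvBestLoop rest (bi, bd)

def get_expected_diagnosis_py_alt (patient : List (String × List String)) : String :=
  (pvBestLoop ((PySem.Dict.mk patient).getD "symptoms" []) (5, "Unknown")).2

-- ===== PRECONDITION & SPEC =====
def Spec_get_expected_diagnosis_py (patient : List (String × List String)) (out : String) : Prop := out = get_expected_diagnosis_py_alt patient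
instance (patient : List (String × List String)) (out : String) : Decidable (Spec_get_expected_diagnosis_py patient out) := by unfold Spec_get_expected_diagnosis_py; infer_instance

-- ===== CLAIM (what is proved, stated in full; the proofs are below) =====
def Claim_equal_get_expected_diagnosis_py : Prop := ∀ (patient : List (String × List String)), Dom_get_expected_diagnosis_py patient → Spec_get_expected_diagnosis_py patient (get_expected_diagnosis_py patient)

-- ===== LEMMAS AND PROOFS =====

-- index of the first branch of A's chain that fires on a symptom list (5 = none)
def pvAIdx (l : List String) : Int :=
  if l.any (fun s => (["chorea", "involuntary movements", "cognitive decline"] : List String).contains s) then 0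
  else if l.any (fun s => (["chronic cough", "thick mucus", "recurrent lung infections"] : List String).contains s) then 1
  else if l.any (fun s => (["muscle weakness", "double vision", "drooping eyelids"] : List String).contains s) then 2
  else if l.any (fun s => (["muscle weakness", "muscle atrophy", "fasciculations"] : List String).contains s) then 3
  else if l.any (fun s => (["liver problems", "neurological symptoms", "tremor"] : List String).contains s) then 4
  else 5

def pvDxOf (i : Int) : String :=
  if i = 0 then "Huntington Disease"
  else if i = 1 then "Cystic Fibrosis"
  else if i = 2 then "Myasthenia Gravis"
  else if i = 3 then "Amyotrophic Lateral Sclerosis"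
  else if i = 4 then "Wilson Disease"
  else "Unknown"

-- first-group index of a single symptom, per A's chain order
def pvGIdx (s : String) : Int :=
  if (["chorea", "involuntary movements", "cognitive decline"] : List String).contains s then 0
  else if (["chronic cough", "thick mucus", "recurrent lung infections"] : List String).contains s then 1
  else if (["muscle weakness", "double vision", "drooping eyelids"] : List String).contains s then 2
  else if (["muscle weakness", "muscle atrophy", "fasciculations"] : List String).contains s then 3
  else if (["liver problems", "neurological symptoms", "tremor"] : List String).contains s then 4
  else 5

theorem pvAIdx_bounds (l : List String) : 0 ≤ pvAIdx l ∧ pvAIdx l ≤ 5 := by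
  unfold pvAIdx; split_ifs <;> omega

theorem pvGIdx_bounds (s : String) : 0 ≤ pvGIdx s ∧ pvGIdx s ≤ 5 := by
  unfold pvGIdx; split_ifs <;> omega

-- the dict lookup is exactly "first group containing s, with its diagnosis"
theorem pvGet_eq (s : String) :
    pvSymptomIndex.get? s = if pvGIdx s = 5 then none else some (pvGIdx s, pvDxOf (pvGIdx s)) := by
  by_cases h : s ∈ ["chorea", "involuntary movements", "cognitive decline", "chronic cough",
      "thick mucus", "recurrent lung infections", "muscle weakness", "double vision",
      "drooping eyelids", "muscle atrophy", "fasciculations", "liver problems",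
      "neurological symptoms", "tremor"]
  · simp only [List.mem_cons, List.not_mem_nil, or_false] at h
    rcases h with rfl|rfl|rfl|rfl|rfl|rfl|rfl|rfl|rfl|rfl|rfl|rfl|rfl|rfl <;> decide
  · simp only [List.mem_cons, List.not_mem_nil, or_false, not_or] at h
    obtain ⟨h1,h2,h3,h4,h5,h6,h7,h8,h9,h10,h11,h12,h13,h14⟩ := h
    have hg : pvGIdx s = 5 := by
      unfold pvGIdx
      simp [List.contains_eq_mem, h1,h2,h3,h4,h5,h6,h7,h8,h9,h10,h11,h12,h13,h14]
    rw [hg]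
    simp only [pvSymptomIndex, PySem.Dict.get?_mk_cons]
    simp [beq_iff_eq, Ne.symm h1, Ne.symm h2, Ne.symm h3, Ne.symm h4, Ne.symm h5, Ne.symm h6,
      Ne.symm h7, Ne.symm h8, Ne.symm h9, Ne.symm h10, Ne.symm h11, Ne.symm h12, Ne.symm h13,
      Ne.symm h14, PySem.Dict.get?]

-- A's chain index peels one symptom: first branch over s::l = min over s and over l
theorem pvAIdx_cons (s : String) (l : List String) :
    pvAIdx (s :: l) = min (pvGIdx s) (pvAIdx l) := by
  have hb := pvAIdx_bounds l
  by_cases h : s ∈ ["chorea", "involuntary movements", "cognitive decline", "chronic cough",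
      "thick mucus", "recurrent lung infections", "muscle weakness", "double vision",
      "drooping eyelids", "muscle atrophy", "fasciculations", "liver problems",
      "neurological symptoms", "tremor"]
  · simp only [List.mem_cons, List.not_mem_nil, or_false] at h
    rcases h with rfl|rfl|rfl|rfl|rfl|rfl|rfl|rfl|rfl|rfl|rfl|rfl|rfl|rfl <;>
      · unfold pvAIdx pvGIdx
        simp only [List.any_cons, List.contains_cons, List.contains_nil, String.reduceBEq,
          Bool.or_false, Bool.false_or, Bool.true_or, Bool.or_true, beq_self_eq_true,
          Bool.or_self, if_true]
        split_ifs
        all_goals (first | omega | exact False.elim (by assumption))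
  · simp only [List.mem_cons, List.not_mem_nil, or_false, not_or] at h
    obtain ⟨h1,h2,h3,h4,h5,h6,h7,h8,h9,h10,h11,h12,h13,h14⟩ := h
    have hg : pvGIdx s = 5 := by
      unfold pvGIdx
      simp [List.contains_eq_mem, h1,h2,h3,h4,h5,h6,h7,h8,h9,h10,h11,h12,h13,h14]
    have hc : pvAIdx (s :: l) = pvAIdx l := by
      unfold pvAIdx
      simp [List.any_cons, List.contains_eq_mem, h1,h2,h3,h4,h5,h6,h7,h8,h9,h10,h11,h12,h13,h14]
    rw [hc, hg]; omega

-- B's loop invariant: starting from (bi, pvDxOf bi), the loop computes the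
-- minimum of bi and A's chain index, paired with its diagnosis
theorem pvBestLoop_spec (l : List String) : ∀ bi : Int, 0 ≤ bi → bi ≤ 5 →
    pvBestLoop l (bi, pvDxOf bi) = (min bi (pvAIdx l), pvDxOf (min bi (pvAIdx l))) := by
  induction l with
  | nil =>
    intro bi h0 h5
    have h5' : pvAIdx [] = 5 := by decide
    have : min bi (pvAIdx []) = bi := by omega
    rw [this]; rfl
  | cons s rest ih =>
    intro bi h0 h5
    have hg := pvGIdx_bounds s
    have hr := pvAIdx_bounds rest
    have hcons := pvAIdx_cons s rest
    show (match pvSymptomIndex.get? s with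
      | some hit => if hit.1 < bi then pvBestLoop rest hit else pvBestLoop rest (bi, pvDxOf bi)
      | none => pvBestLoop rest (bi, pvDxOf bi)) = _
    rw [pvGet_eq s]
    by_cases h5g : pvGIdx s = 5
    · rw [if_pos h5g]
      rw [ih bi h0 h5]
      have : min bi (pvAIdx (s :: rest)) = min bi (pvAIdx rest) := by omega
      rw [this]
    · rw [if_neg h5g]
      simp only
      by_cases hlt : pvGIdx s < bi
      · rw [if_pos hlt, ih (pvGIdx s) hg.1 hg.2]
        have : min (pvGIdx s) (pvAIdx rest) = min bi (pvAIdx (s :: rest)) := by omega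
        rw [this]
      · rw [if_neg hlt, ih bi h0 h5]
        have : min bi (pvAIdx rest) = min bi (pvAIdx (s :: rest)) := by omega
        rw [this]

theorem pvA_eq_dx (patient : List (String × List String)) :
    get_expected_diagnosis_py patient
      = pvDxOf (pvAIdx ((PySem.Dict.mk patient).getD "symptoms" [])) := by
  simp only [get_expected_diagnosis_py, pvAIdx]
  split_ifs <;> rfl

-- ===== VERDICT (by name: the statement is the Claim_ definition above) =====
theorem get_expected_diagnosis_py_spec : Claim_equal_get_expected_diagnosis_py := by
  intro patient _
  unfold Spec_get_expected_diagnosis_py get_expected_diagnosis_py_alt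
  set sy := (PySem.Dict.mk patient).getD "symptoms" [] with hsy
  have hstart : ((5 : Int), "Unknown") = ((5 : Int), pvDxOf 5) := rfl
  rw [pvA_eq_dx, ← hsy, hstart, pvBestLoop_spec sy 5 (by omega) (by omega)]
  have hb := pvAIdx_bounds sy
  have : min (5 : Int) (pvAIdx sy) = pvAIdx sy := by omega
  rw [this]
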